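-- pv_equiv track=rewrite | github.com/himanshu231204/gitpush | gitpush/utils/diff_cleaner.py | _collect_file_stats
-- ===== SOURCE A (Python) =====
-- from typing import Dict, List
--
-- def _collect_file_stats(diff_text: str) -> Dict[str, Dict[str, int]]:
--     """Collect file-level stats from diff text."""
--
--     stats: Dict[str, Dict[str, int]] = {}
--     current_file = "unknown"
--
--     for line in diff_text.splitlines():
--         if line.startswith("diff --git "):
--             current_file = _extract_path_from_diff_header(line)
--             stats.setdefault(current_file, {"additions": 0, "deletions": 0, "hunks": 0})
--             continue
--
--         if line.startswith("@@"):
--             stats.setdefault(current_file, {"additions": 0, "deletions": 0, "hunks": 0})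
--             stats[current_file]["hunks"] += 1
--             continue
--
--         if line.startswith("+") and not line.startswith("+++"):
--             stats.setdefault(current_file, {"additions": 0, "deletions": 0, "hunks": 0})
--             stats[current_file]["additions"] += 1
--             continue
--
--         if line.startswith("-") and not line.startswith("---"):
--             stats.setdefault(current_file, {"additions": 0, "deletions": 0, "hunks": 0})
--             stats[current_file]["deletions"] += 1
--
--     return stats
--
-- def _extract_path_from_diff_header(header_line: str) -> str:
--     """Extract file path from `diff --git a/x b/x` header."""
--
--     parts = header_line.split()
--     if len(parts) < 4:
--         return "unknown"
--     b_path = parts[3]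
--     if b_path.startswith("b/"):
--         return b_path[2:]
--     return b_path
-- ===== SOURCE B (Python) =====
-- from typing import Dict, List
--
-- def _collect_file_stats(diff_text: str) -> Dict[str, Dict[str, int]]:
--     """Collect file-level stats from diff text (segment-based rewrite)."""
--
--     # Phase 1: split the lines into segments, each with the file key it belongs to.
--     segments = []  # (key, came_from_header, lines)
--     key, has_header, buf = "unknown", False, []
--     for line in diff_text.splitlines():
--         if line.startswith("diff --git "):
--             segments.append((key, has_header, buf))
--             key, has_header, buf = _extract_path_from_diff_header(line), True, []
--         else:
--             buf.append(line)
--     segments.append((key, has_header, buf))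
--
--     # Phase 2: reduce each segment to counts and merge segments sharing a key.
--     stats: Dict[str, Dict[str, int]] = {}
--     for key, has_header, lines in segments:
--         a = sum(1 for l in lines if l.startswith("+") and not l.startswith("+++"))
--         d = sum(1 for l in lines if l.startswith("-") and not l.startswith("---"))
--         h = sum(1 for l in lines if l.startswith("@@"))
--         prev = stats.get(key)
--         if prev is not None:
--             stats[key] = {"additions": prev["additions"] + a,
--                           "deletions": prev["deletions"] + d,
--                           "hunks": prev["hunks"] + h}
--         elif has_header or a or d or h:
--             stats[key] = {"additions": a, "deletions": d, "hunks": h}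
--     return stats
--
-- def _extract_path_from_diff_header(header_line: str) -> str:
--     """Extract file path from `diff --git a/x b/x` header."""
--
--     parts = header_line.split()
--     if len(parts) < 4:
--         return "unknown"
--     b_path = parts[3]
--     if b_path.startswith("b/"):
--         return b_path[2:]
--     return b_path
-- ===== Notes on version B (the rewrite author's own statement) =====
-- stated objective: alternative
-- what changed: A's single stateful line loop (current-file register, dict mutated per line) is replaced by a two-phase decomposition: split the lines at 'diff --git ' headers into keyed segments, reduce each segment to (additions, deletions, hunks) counts with countP-style passes, then merge segments into the dict, creating the leading 'unknown' entry only if its segment contains a counting line.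
import Mathlib
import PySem

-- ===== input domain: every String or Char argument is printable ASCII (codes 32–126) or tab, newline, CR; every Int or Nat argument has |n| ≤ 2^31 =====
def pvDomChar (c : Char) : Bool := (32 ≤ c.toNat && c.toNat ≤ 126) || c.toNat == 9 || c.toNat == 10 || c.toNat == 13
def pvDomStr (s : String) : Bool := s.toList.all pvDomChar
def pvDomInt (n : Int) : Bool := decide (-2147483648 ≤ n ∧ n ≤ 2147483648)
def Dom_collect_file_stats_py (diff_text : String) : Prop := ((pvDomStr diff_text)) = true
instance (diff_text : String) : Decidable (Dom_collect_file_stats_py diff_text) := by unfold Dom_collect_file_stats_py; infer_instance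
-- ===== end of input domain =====

-- B re-implements the line loop as a two-phase segment split + per-segment counting/merge (objective: alternative decomposition); return value only, no mutation.

-- shared helper: Python's _extract_path_from_diff_header (both A and B call it)
def extract_path_from_diff_header_py (header_line : String) : String :=
  let parts := PySem.Str.split₀ header_line
  if parts.length < 4 then "unknown"
  else
    let b_path := PySem.List.pyGetD parts 3 ""
    if PySem.Str.startswith b_path "b/" then PySem.Str.slice b_path (some 2) none
    else b_path

-- the dict literal {"additions": a, "deletions": d, "hunks": h}
def pvMk3 (a d h : Int) : PySem.Dict String Int :=
  ((PySem.Dict.empty.insert "additions" a).insert "deletions" d).insert "hunks" h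

-- ===== PORT A =====
def collect_file_stats_step (st : PySem.Dict String (PySem.Dict String Int) × String)
    (line : String) : PySem.Dict String (PySem.Dict String Int) × String :=
  if PySem.Str.startswith line "diff --git " then
    let cf := extract_path_from_diff_header_py line
    (st.1.setdefault cf (pvMk3 0 0 0), cf)
  else if PySem.Str.startswith line "@@" then
    let s := st.1.setdefault st.2 (pvMk3 0 0 0)
    (s.insert st.2 ((s.getD st.2 (pvMk3 0 0 0)).modify "hunks" 0 (· + 1)), st.2)
  else if PySem.Str.startswith line "+" && !PySem.Str.startswith line "+++" then
    let s := st.1.setdefault st.2 (pvMk3 0 0 0)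
    (s.insert st.2 ((s.getD st.2 (pvMk3 0 0 0)).modify "additions" 0 (· + 1)), st.2)
  else if PySem.Str.startswith line "-" && !PySem.Str.startswith line "---" then
    let s := st.1.setdefault st.2 (pvMk3 0 0 0)
    (s.insert st.2 ((s.getD st.2 (pvMk3 0 0 0)).modify "deletions" 0 (· + 1)), st.2)
  else st

def collect_file_stats_py (diff_text : String) : List (String × List (String × Int)) :=
  let fin := (PySem.Str.splitlines diff_text).foldl collect_file_stats_step (PySem.Dict.empty, "unknown")
  fin.1.items.map (fun p => (p.1, p.2.items))

-- ===== PORT B =====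
-- per-segment counts (additions, deletions, hunks)
def pvCounts (lines : List String) : Int × Int × Int :=
  ((lines.countP (fun l => PySem.Str.startswith l "+" && !PySem.Str.startswith l "+++") : Int),
   (lines.countP (fun l => PySem.Str.startswith l "-" && !PySem.Str.startswith l "---") : Int),
   (lines.countP (fun l => PySem.Str.startswith l "@@") : Int))

-- phase 1 step: split lines into (key, came_from_header, lines) segments
def pvSegStep (st : List (String × Bool × List String) × String × Bool × List String)
    (line : String) : List (String × Bool × List String) × String × Bool × List String :=
  if PySem.Str.startswith line "diff --git " then
    (st.1 ++ [(st.2.1, st.2.2.1, st.2.2.2)], extract_path_from_diff_header_py line, true, [])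
  else (st.1, st.2.1, st.2.2.1, st.2.2.2 ++ [line])

-- phase 2 step: merge one segment's counts into the stats dict
def pvMergeStep (stats : PySem.Dict String (PySem.Dict String Int))
    (seg : String × Bool × List String) : PySem.Dict String (PySem.Dict String Int) :=
  let c := pvCounts seg.2.2
  match stats.get? seg.1 with
  | some prev =>
      stats.insert seg.1 (pvMk3 (prev.getD "additions" 0 + c.1)
        (prev.getD "deletions" 0 + c.2.1) (prev.getD "hunks" 0 + c.2.2))
  | none =>
      if seg.2.1 || c.1 != 0 || c.2.1 != 0 || c.2.2 != 0 then
        stats.insert seg.1 (pvMk3 c.1 c.2.1 c.2.2)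
      else stats

def collect_file_stats_py_alt (diff_text : String) : List (String × List (String × Int)) :=
  let st := (PySem.Str.splitlines diff_text).foldl pvSegStep ([], "unknown", false, [])
  let segments := st.1 ++ [(st.2.1, st.2.2.1, st.2.2.2)]
  let stats := segments.foldl pvMergeStep PySem.Dict.empty
  stats.items.map (fun p => (p.1, p.2.items))

-- ===== PRECONDITION & SPEC =====
def Spec_collect_file_stats_py (diff_text : String) (out : List (String × List (String × Int))) : Prop := out = collect_file_stats_py_alt diff_text
instance (diff_text : String) (out : List (String × List (String × Int))) : Decidable (Spec_collect_file_stats_py diff_text out) := by unfold Spec_collect_file_stats_py; infer_instance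

-- ===== CLAIM (what is proved, stated in full; the proofs are below) =====
def Claim_equal_collect_file_stats_py : Prop := ∀ (diff_text : String), Dom_collect_file_stats_py diff_text → Spec_collect_file_stats_py diff_text (collect_file_stats_py diff_text)

-- ===== LEMMAS AND PROOFS =====

-- generic dict fact: re-inserting the value already stored (first match) under unique keys is a no-op
theorem pv_map_replace {κ ν : Type} [BEq κ] [LawfulBEq κ] (k : κ) (v : ν) :
    ∀ (l : List (κ × ν)), (l.map (·.1)).Nodup → (PySem.Dict.mk l).get? k = some v →
      l.map (fun p => if p.1 == k then (k, v) else p) = l := by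
  intro l
  induction l with
  | nil => intro _ h; simp [PySem.Dict.get?] at h
  | cons p t ih =>
    intro hnd hg
    rw [PySem.Dict.get?_mk_cons] at hg
    simp only [List.map_cons, List.nodup_cons] at hnd ⊢
    by_cases hbk : p.1 == k
    · have hk : p.1 = k := by exact eq_of_beq hbk
      rw [if_pos hbk]
      rw [if_pos hbk] at hg
      simp at hg
      simp only [List.cons.injEq]
      refine ⟨?_, ?_⟩
      · cases p; simp_all
      · have : ∀ q ∈ t, (fun p => if p.1 == k then (k, v) else p) q = q := by
          intro q hq
          have : q.1 ≠ k := by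
            intro he; exact hnd.1 (by rw [← he] at hk; rw [hk]; exact List.mem_map_of_mem hq)
          simp [this]
        rw [List.map_congr_left this]; simp
    · rw [if_neg hbk] at hg
      rw [if_neg (by simpa using hbk)]
      rw [ih hnd.2 hg]

theorem pv_insert_self {κ ν : Type} [BEq κ] [LawfulBEq κ] (d : PySem.Dict κ ν) (k : κ) (v : ν)
    (hnd : d.keys.Nodup) (h : d.get? k = some v) : d.insert k v = d := by
  apply PySem.Dict.ext
  rw [PySem.Dict.items_insert]
  have hc : d.contains k = true := by rw [PySem.Dict.contains_eq_isSome_get?, h]; rfl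
  rw [if_pos hc]
  cases d with
  | mk items => exact pv_map_replace k v items hnd h

-- the inner dicts A builds are always {"additions","deletions","hunks"} triples
def pvInnerOK (d : PySem.Dict String (PySem.Dict String Int)) : Prop :=
  ∀ k v, d.get? k = some v → ∃ a b c, v = pvMk3 a b c

theorem pvMk3_getA (a b c : Int) : (pvMk3 a b c).getD "additions" 0 = a := by simp [pvMk3, PySem.Dict.getD_insert, PySem.Dict.getD_insert_self]
theorem pvMk3_getB (a b c : Int) : (pvMk3 a b c).getD "deletions" 0 = b := by simp [pvMk3, PySem.Dict.getD_insert, PySem.Dict.getD_insert_self]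
theorem pvMk3_getH (a b c : Int) : (pvMk3 a b c).getD "hunks" 0 = c := by simp [pvMk3, PySem.Dict.getD_insert_self]
theorem pvMk3_modA (a b c : Int) : (pvMk3 a b c).modify "additions" 0 (· + 1) = pvMk3 (a+1) b c := rfl
theorem pvMk3_modB (a b c : Int) : (pvMk3 a b c).modify "deletions" 0 (· + 1) = pvMk3 a (b+1) c := rfl
theorem pvMk3_modH (a b c : Int) : (pvMk3 a b c).modify "hunks" 0 (· + 1) = pvMk3 a b (c+1) := rfl
theorem pvMk3_eq {a b c a' b' c' : Int} (h1 : a = a') (h2 : b = b') (h3 : c = c') :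
    pvMk3 a b c = pvMk3 a' b' c' := by rw [h1, h2, h3]

theorem pvInnerOK_empty : pvInnerOK PySem.Dict.empty := by
  intro k v h; simp [PySem.Dict.get?_empty] at h

theorem pvInnerOK_insert (d : PySem.Dict String (PySem.Dict String Int)) (k : String)
    (a b c : Int) (h : pvInnerOK d) : pvInnerOK (d.insert k (pvMk3 a b c)) := by
  intro k' v hv
  rw [PySem.Dict.get?_insert] at hv
  by_cases hk : k' = k
  · rw [if_pos hk] at hv
    exact ⟨a, b, c, (Option.some_injective _ hv).symm⟩
  · rw [if_neg hk] at hv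
    exact h k' v hv

theorem pvInnerOK_setdefault (d : PySem.Dict String (PySem.Dict String Int)) (k : String)
    (h : pvInnerOK d) : pvInnerOK (d.setdefault k (pvMk3 0 0 0)) := by
  cases hc : d.contains k
  · rw [PySem.Dict.setdefault_of_not_contains _ _ hc]
    exact pvInnerOK_insert d k 0 0 0 h
  · rw [PySem.Dict.setdefault_of_contains _ _ hc]
    exact h

theorem pv_nodup_setdefault (d : PySem.Dict String (PySem.Dict String Int)) (k : String)
    (v : PySem.Dict String Int) (h : d.keys.Nodup) : (d.setdefault k v).keys.Nodup := by
  cases hc : d.contains k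
  · rw [PySem.Dict.setdefault_of_not_contains _ _ hc]
    exact PySem.Dict.nodup_keys_insert _ _ _ h
  · rw [PySem.Dict.setdefault_of_contains _ _ hc]
    exact h

theorem pv_contains_setdefault (d : PySem.Dict String (PySem.Dict String Int)) (k : String)
    (v : PySem.Dict String Int) : (d.setdefault k v).contains k = true := by
  cases hc : d.contains k
  · rw [PySem.Dict.setdefault_of_not_contains _ _ hc]
    exact PySem.Dict.contains_insert_self _ _ _
  · rw [PySem.Dict.setdefault_of_contains _ _ hc]
    exact hc

theorem pv_getD_mk3 (d : PySem.Dict String (PySem.Dict String Int)) (k : String)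
    (hOK : pvInnerOK d) : ∃ x y z : Int, d.getD k (pvMk3 0 0 0) = pvMk3 x y z := by
  cases hget : d.get? k with
  | none => exact ⟨0, 0, 0, PySem.Dict.getD_of_get?_eq_none _ _ hget⟩
  | some v =>
    obtain ⟨x, y, z, rfl⟩ := hOK k v hget
    exact ⟨x, y, z, PySem.Dict.getD_of_get?_eq_some _ _ hget⟩

-- first-character disjointness of the counting predicates
theorem pv_sw_ne (l : String) (c₁ c₂ : Char) (hne : c₁ ≠ c₂) (p₁ p₂ : List Char)
    (h : PySem.Chars.startswith l.toList (c₁ :: p₁) = true) :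
    PySem.Chars.startswith l.toList (c₂ :: p₂) = false := by
  rw [PySem.Chars.startswith_iff] at h
  cases hb : PySem.Chars.startswith l.toList (c₂ :: p₂)
  · rfl
  · exfalso
    rw [PySem.Chars.startswith_iff] at hb
    cases hl : l.toList with
    | nil => rw [hl] at h; exact absurd (List.prefix_nil.mp h) (by simp)
    | cons x xs =>
      rw [hl] at h hb
      rw [List.cons_prefix_cons] at h hb
      exact hne (h.1.trans hb.1.symm)

theorem pv_at_plus (l : String) (h : PySem.Str.startswith l "@@" = true) :
    PySem.Str.startswith l "+" = false := by
  simp only [PySem.Str.startswith_eq] at *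
  exact pv_sw_ne l '@' '+' (by decide) ['@'] [] h
theorem pv_at_minus (l : String) (h : PySem.Str.startswith l "@@" = true) :
    PySem.Str.startswith l "-" = false := by
  simp only [PySem.Str.startswith_eq] at *
  exact pv_sw_ne l '@' '-' (by decide) ['@'] [] h
theorem pv_plus_minus (l : String) (h : PySem.Str.startswith l "+" = true) :
    PySem.Str.startswith l "-" = false := by
  simp only [PySem.Str.startswith_eq] at *
  exact pv_sw_ne l '+' '-' (by decide) [] [] h
theorem pv_plus_at (l : String) (h : PySem.Str.startswith l "+" = true) :
    PySem.Str.startswith l "@@" = false := by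
  simp only [PySem.Str.startswith_eq] at *
  exact pv_sw_ne l '+' '@' (by decide) [] ['@'] h
theorem pv_minus_at (l : String) (h : PySem.Str.startswith l "-" = true) :
    PySem.Str.startswith l "@@" = false := by
  simp only [PySem.Str.startswith_eq] at *
  exact pv_sw_ne l '-' '@' (by decide) [] ['@'] h

-- proof-side segment splitter (recursive form of phase 1)
def pvSplitSegs : List String → List String × List (String × List String)
  | [] => ([], [])
  | l :: ls =>
    let r := pvSplitSegs ls
    if PySem.Str.startswith l "diff --git " then ([], (extract_path_from_diff_header_py l, r.1) :: r.2)
    else (l :: r.1, r.2)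

def pvMergeAll (d : PySem.Dict String (PySem.Dict String Int)) (segs : List (String × List String)) :
    PySem.Dict String (PySem.Dict String Int) :=
  segs.foldl (fun d s => pvMergeStep d (s.1, true, s.2)) d

theorem pvCounts_nonneg (b : List String) :
    0 ≤ (pvCounts b).1 ∧ 0 ≤ (pvCounts b).2.1 ∧ 0 ≤ (pvCounts b).2.2 := by
  simp [pvCounts]

-- L1: a segment with no counting lines merges to nothing
theorem pvMergeStep_nil (stats : PySem.Dict String (PySem.Dict String Int)) (cur : String) (hf : Bool)
    (hnd : stats.keys.Nodup) (hOK : pvInnerOK stats) (hc : stats.contains cur = hf) :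
    pvMergeStep stats (cur, hf, []) = stats := by
  cases hget : stats.get? cur with
  | none =>
    have hff : hf = false := by
      rw [← hc, PySem.Dict.contains_eq_isSome_get?, hget]; rfl
    simp [pvMergeStep, pvCounts, hget, hff]
  | some prev =>
    obtain ⟨a, b, c, rfl⟩ := hOK cur prev hget
    simp only [pvMergeStep, pvCounts, List.countP_nil, Nat.cast_zero, hget,
      pvMk3_getA, pvMk3_getB, pvMk3_getH, add_zero]
    exact pv_insert_self stats cur _ hnd hget

-- L2: A's setdefault at a header is absorbed by the later merge of that segment
theorem pvMergeStep_setdefault (stats : PySem.Dict String (PySem.Dict String Int)) (k : String)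
    (b : List String) (hnd : stats.keys.Nodup) :
    pvMergeStep (stats.setdefault k (pvMk3 0 0 0)) (k, true, b) = pvMergeStep stats (k, true, b) := by
  cases hc : stats.contains k
  · rw [PySem.Dict.setdefault_of_not_contains _ _ hc]
    have hget : stats.get? k = none := by
      cases hg : stats.get? k with
      | none => rfl
      | some v => rw [PySem.Dict.contains_eq_isSome_get?, hg] at hc; simp at hc
    simp only [pvMergeStep, PySem.Dict.get?_insert_self, hget,
      pvMk3_getA, pvMk3_getB, pvMk3_getH, PySem.Dict.insert_insert_self, zero_add,
      Bool.true_or, if_true]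
  · rw [PySem.Dict.setdefault_of_contains _ _ hc]

-- generic absorption: A's in-segment increment equals counting the line in B's segment
theorem pvMergeStep_bump (stats : PySem.Dict String (PySem.Dict String Int)) (cur : String) (hf : Bool)
    (b bigb : List String) (da db dh : Nat) (hsum : 0 < da + db + dh)
    (upd : PySem.Dict String Int → PySem.Dict String Int)
    (hnd : stats.keys.Nodup) (hOK : pvInnerOK stats) (hc : stats.contains cur = hf)
    (hupd : ∀ x y z : Int, upd (pvMk3 x y z) = pvMk3 (x + da) (y + db) (z + dh))
    (hca : (pvCounts bigb).1 = (pvCounts b).1 + da)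
    (hcd : (pvCounts bigb).2.1 = (pvCounts b).2.1 + db)
    (hch : (pvCounts bigb).2.2 = (pvCounts b).2.2 + dh) :
    pvMergeStep ((stats.setdefault cur (pvMk3 0 0 0)).insert cur
        (upd ((stats.setdefault cur (pvMk3 0 0 0)).getD cur (pvMk3 0 0 0)))) (cur, true, b)
      = pvMergeStep stats (cur, hf, bigb) := by
  cases hget : stats.get? cur with
  | some prev =>
    have hcon : stats.contains cur = true := by
      rw [PySem.Dict.contains_eq_isSome_get?, hget]; rfl
    obtain ⟨x, y, z, rfl⟩ := hOK cur prev hget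
    rw [PySem.Dict.setdefault_of_contains _ _ hcon,
        PySem.Dict.getD_of_get?_eq_some _ _ hget, hupd]
    simp only [pvMergeStep, PySem.Dict.get?_insert_self, hget,
      pvMk3_getA, pvMk3_getB, pvMk3_getH, PySem.Dict.insert_insert_self, hca, hcd, hch]
    congr 1
    exact pvMk3_eq (by ring) (by ring) (by ring)
  | none =>
    have hcon : stats.contains cur = false := by
      rw [PySem.Dict.contains_eq_isSome_get?, hget]; rfl
    have hff : hf = false := by rw [← hc, hcon]
    rw [PySem.Dict.setdefault_of_not_contains _ _ hcon, PySem.Dict.getD_insert_self, hupd]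
    simp only [pvMergeStep, PySem.Dict.get?_insert_self, hget, hff,
      pvMk3_getA, pvMk3_getB, pvMk3_getH, PySem.Dict.insert_insert_self]
    rw [if_pos ?cond]
    case cond =>
      obtain ⟨hA, hD, hH⟩ := pvCounts_nonneg b
      simp only [Bool.false_or, Bool.or_eq_true, bne_iff_ne, ne_eq]
      omega
    congr 1
    exact pvMk3_eq (by rw [hca]; ring) (by rw [hcd]; ring) (by rw [hch]; ring)

theorem pvMergeStep_line_at (stats : PySem.Dict String (PySem.Dict String Int)) (cur : String)
    (hf : Bool) (l : String) (b : List String)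
    (hnd : stats.keys.Nodup) (hOK : pvInnerOK stats) (hc : stats.contains cur = hf)
    (hat : PySem.Str.startswith l "@@" = true) :
    pvMergeStep ((stats.setdefault cur (pvMk3 0 0 0)).insert cur
        (((stats.setdefault cur (pvMk3 0 0 0)).getD cur (pvMk3 0 0 0)).modify "hunks" 0 (· + 1))) (cur, true, b)
      = pvMergeStep stats (cur, hf, l :: b) := by
  have hplF : (PySem.Str.startswith l "+" && !PySem.Str.startswith l "+++") = false := by
    rw [pv_at_plus l hat, Bool.false_and]
  have hmnF : (PySem.Str.startswith l "-" && !PySem.Str.startswith l "---") = false := by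
    rw [pv_at_minus l hat, Bool.false_and]
  refine pvMergeStep_bump stats cur hf b (l :: b) 0 0 1 (by omega)
    (fun m => m.modify "hunks" 0 (· + 1)) hnd hOK hc ?_ ?_ ?_ ?_
  · intro x y z
    change (pvMk3 x y z).modify "hunks" 0 (· + 1) = _
    rw [pvMk3_modH]
    exact pvMk3_eq (by push_cast; ring) (by push_cast; ring) (by push_cast; ring)
  · simp only [pvCounts, List.countP_cons, hplF]; simp
  · simp only [pvCounts, List.countP_cons, hmnF]; simp
  · simp only [pvCounts, List.countP_cons, hat]; simp

theorem pvMergeStep_line_plus (stats : PySem.Dict String (PySem.Dict String Int)) (cur : String)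
    (hf : Bool) (l : String) (b : List String)
    (hnd : stats.keys.Nodup) (hOK : pvInnerOK stats) (hc : stats.contains cur = hf)
    (hpl : (PySem.Str.startswith l "+" && !PySem.Str.startswith l "+++") = true) :
    pvMergeStep ((stats.setdefault cur (pvMk3 0 0 0)).insert cur
        (((stats.setdefault cur (pvMk3 0 0 0)).getD cur (pvMk3 0 0 0)).modify "additions" 0 (· + 1))) (cur, true, b)
      = pvMergeStep stats (cur, hf, l :: b) := by
  have hp : PySem.Str.startswith l "+" = true := ((Bool.and_eq_true _ _).mp hpl).1
  have hmnF : (PySem.Str.startswith l "-" && !PySem.Str.startswith l "---") = false := by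
    rw [pv_plus_minus l hp, Bool.false_and]
  have hatF : PySem.Str.startswith l "@@" = false := pv_plus_at l hp
  refine pvMergeStep_bump stats cur hf b (l :: b) 1 0 0 (by omega)
    (fun m => m.modify "additions" 0 (· + 1)) hnd hOK hc ?_ ?_ ?_ ?_
  · intro x y z
    change (pvMk3 x y z).modify "additions" 0 (· + 1) = _
    rw [pvMk3_modA]
    exact pvMk3_eq (by push_cast; ring) (by push_cast; ring) (by push_cast; ring)
  · simp only [pvCounts, List.countP_cons, hpl]; simp
  · simp only [pvCounts, List.countP_cons, hmnF]; simp
  · simp only [pvCounts, List.countP_cons, hatF]; simp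

theorem pvMergeStep_line_minus (stats : PySem.Dict String (PySem.Dict String Int)) (cur : String)
    (hf : Bool) (l : String) (b : List String)
    (hnd : stats.keys.Nodup) (hOK : pvInnerOK stats) (hc : stats.contains cur = hf)
    (hplF : (PySem.Str.startswith l "+" && !PySem.Str.startswith l "+++") = false)
    (hmn : (PySem.Str.startswith l "-" && !PySem.Str.startswith l "---") = true) :
    pvMergeStep ((stats.setdefault cur (pvMk3 0 0 0)).insert cur
        (((stats.setdefault cur (pvMk3 0 0 0)).getD cur (pvMk3 0 0 0)).modify "deletions" 0 (· + 1))) (cur, true, b)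
      = pvMergeStep stats (cur, hf, l :: b) := by
  have hm : PySem.Str.startswith l "-" = true := ((Bool.and_eq_true _ _).mp hmn).1
  have hatF : PySem.Str.startswith l "@@" = false := pv_minus_at l hm
  refine pvMergeStep_bump stats cur hf b (l :: b) 0 1 0 (by omega)
    (fun m => m.modify "deletions" 0 (· + 1)) hnd hOK hc ?_ ?_ ?_ ?_
  · intro x y z
    change (pvMk3 x y z).modify "deletions" 0 (· + 1) = _
    rw [pvMk3_modB]
    exact pvMk3_eq (by push_cast; ring) (by push_cast; ring) (by push_cast; ring)
  · simp only [pvCounts, List.countP_cons, hplF]; simp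
  · simp only [pvCounts, List.countP_cons, hmn]; simp
  · simp only [pvCounts, List.countP_cons, hatF]; simp

theorem pvMergeStep_skip (stats : PySem.Dict String (PySem.Dict String Int)) (cur : String)
    (hf : Bool) (l : String) (b : List String)
    (h1 : PySem.Str.startswith l "@@" = false)
    (h2 : (PySem.Str.startswith l "+" && !PySem.Str.startswith l "+++") = false)
    (h3 : (PySem.Str.startswith l "-" && !PySem.Str.startswith l "---") = false) :
    pvMergeStep stats (cur, hf, l :: b) = pvMergeStep stats (cur, hf, b) := by
  have hco : pvCounts (l :: b) = pvCounts b := by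
    simp only [pvCounts, List.countP_cons, h1, h2, h3]; simp
  simp only [pvMergeStep, hco]

-- the main loop/merge correspondence
theorem pv_loop_eq : ∀ (lines : List String) (stats : PySem.Dict String (PySem.Dict String Int))
    (cur : String) (hf : Bool),
    stats.keys.Nodup → pvInnerOK stats → stats.contains cur = hf →
    (lines.foldl collect_file_stats_step (stats, cur)).1
      = pvMergeAll (pvMergeStep stats (cur, hf, (pvSplitSegs lines).1)) (pvSplitSegs lines).2 := by
  intro lines
  induction lines with
  | nil =>
    intro stats cur hf hnd hOK hc
    simp only [List.foldl_nil, pvSplitSegs, pvMergeAll, List.foldl_nil]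
    rw [pvMergeStep_nil stats cur hf hnd hOK hc]
  | cons l ls ih =>
    intro stats cur hf hnd hOK hc
    rw [List.foldl_cons]
    by_cases hhdr : PySem.Str.startswith l "diff --git " = true
    · have hstep : collect_file_stats_step (stats, cur) l
          = (stats.setdefault (extract_path_from_diff_header_py l) (pvMk3 0 0 0),
             extract_path_from_diff_header_py l) := by
        simp only [collect_file_stats_step]
        rw [if_pos hhdr]
      rw [hstep]
      have hnd1 := pv_nodup_setdefault stats (extract_path_from_diff_header_py l) (pvMk3 0 0 0) hnd
      have hOK1 := pvInnerOK_setdefault stats (extract_path_from_diff_header_py l) hOK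
      have hc1 := pv_contains_setdefault stats (extract_path_from_diff_header_py l) (pvMk3 0 0 0)
      rw [ih _ _ true hnd1 hOK1 hc1]
      show _ = pvMergeAll (pvMergeStep stats (cur, hf, (pvSplitSegs (l :: ls)).1)) (pvSplitSegs (l :: ls)).2
      simp only [pvSplitSegs]
      rw [if_pos hhdr]
      simp only [pvMergeAll, List.foldl_cons]
      rw [pvMergeStep_nil stats cur hf hnd hOK hc]
      rw [pvMergeStep_setdefault stats _ _ hnd]
    · by_cases hat : PySem.Str.startswith l "@@" = true
      · have hstep : collect_file_stats_step (stats, cur) l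
            = ((stats.setdefault cur (pvMk3 0 0 0)).insert cur
                (((stats.setdefault cur (pvMk3 0 0 0)).getD cur (pvMk3 0 0 0)).modify "hunks" 0 (· + 1)), cur) := by
          simp only [collect_file_stats_step]
          rw [if_neg hhdr, if_pos hat]
        rw [hstep]
        obtain ⟨x, y, z, hmk⟩ := pv_getD_mk3 (stats.setdefault cur (pvMk3 0 0 0)) cur
          (pvInnerOK_setdefault stats cur hOK)
        have hnd1 : ((stats.setdefault cur (pvMk3 0 0 0)).insert cur
            (((stats.setdefault cur (pvMk3 0 0 0)).getD cur (pvMk3 0 0 0)).modify "hunks" 0 (· + 1))).keys.Nodup :=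
          PySem.Dict.nodup_keys_insert _ _ _ (pv_nodup_setdefault stats cur (pvMk3 0 0 0) hnd)
        have hOK1 : pvInnerOK ((stats.setdefault cur (pvMk3 0 0 0)).insert cur
            (((stats.setdefault cur (pvMk3 0 0 0)).getD cur (pvMk3 0 0 0)).modify "hunks" 0 (· + 1))) := by
          rw [hmk, pvMk3_modH]
          exact pvInnerOK_insert _ cur x y (z+1) (pvInnerOK_setdefault stats cur hOK)
        rw [ih _ _ true hnd1 hOK1 (PySem.Dict.contains_insert_self _ _ _)]
        show _ = pvMergeAll (pvMergeStep stats (cur, hf, (pvSplitSegs (l :: ls)).1)) (pvSplitSegs (l :: ls)).2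
        simp only [pvSplitSegs]
        rw [if_neg hhdr]
        rw [pvMergeStep_line_at stats cur hf l (pvSplitSegs ls).1 hnd hOK hc hat]
      · have hat' : PySem.Str.startswith l "@@" = false := by
          cases h : PySem.Str.startswith l "@@"
          · rfl
          · exact absurd h hat
        by_cases hpl : (PySem.Str.startswith l "+" && !PySem.Str.startswith l "+++") = true
        · have hstep : collect_file_stats_step (stats, cur) l
              = ((stats.setdefault cur (pvMk3 0 0 0)).insert cur
                  (((stats.setdefault cur (pvMk3 0 0 0)).getD cur (pvMk3 0 0 0)).modify "additions" 0 (· + 1)), cur) := by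
            simp only [collect_file_stats_step]
            rw [if_neg hhdr, if_neg hat, if_pos hpl]
          rw [hstep]
          obtain ⟨x, y, z, hmk⟩ := pv_getD_mk3 (stats.setdefault cur (pvMk3 0 0 0)) cur
            (pvInnerOK_setdefault stats cur hOK)
          have hnd1 : ((stats.setdefault cur (pvMk3 0 0 0)).insert cur
              (((stats.setdefault cur (pvMk3 0 0 0)).getD cur (pvMk3 0 0 0)).modify "additions" 0 (· + 1))).keys.Nodup :=
            PySem.Dict.nodup_keys_insert _ _ _ (pv_nodup_setdefault stats cur (pvMk3 0 0 0) hnd)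
          have hOK1 : pvInnerOK ((stats.setdefault cur (pvMk3 0 0 0)).insert cur
              (((stats.setdefault cur (pvMk3 0 0 0)).getD cur (pvMk3 0 0 0)).modify "additions" 0 (· + 1))) := by
            rw [hmk, pvMk3_modA]
            exact pvInnerOK_insert _ cur (x+1) y z (pvInnerOK_setdefault stats cur hOK)
          rw [ih _ _ true hnd1 hOK1 (PySem.Dict.contains_insert_self _ _ _)]
          show _ = pvMergeAll (pvMergeStep stats (cur, hf, (pvSplitSegs (l :: ls)).1)) (pvSplitSegs (l :: ls)).2
          simp only [pvSplitSegs]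
          rw [if_neg hhdr]
          rw [pvMergeStep_line_plus stats cur hf l (pvSplitSegs ls).1 hnd hOK hc hpl]
        · have hpl' : (PySem.Str.startswith l "+" && !PySem.Str.startswith l "+++") = false := by
            cases h : (PySem.Str.startswith l "+" && !PySem.Str.startswith l "+++")
            · rfl
            · exact absurd h hpl
          by_cases hmn : (PySem.Str.startswith l "-" && !PySem.Str.startswith l "---") = true
          · have hstep : collect_file_stats_step (stats, cur) l
                = ((stats.setdefault cur (pvMk3 0 0 0)).insert cur
                    (((stats.setdefault cur (pvMk3 0 0 0)).getD cur (pvMk3 0 0 0)).modify "deletions" 0 (· + 1)), cur) := by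
              simp only [collect_file_stats_step]
              rw [if_neg hhdr, if_neg hat, if_neg hpl, if_pos hmn]
            rw [hstep]
            obtain ⟨x, y, z, hmk⟩ := pv_getD_mk3 (stats.setdefault cur (pvMk3 0 0 0)) cur
              (pvInnerOK_setdefault stats cur hOK)
            have hnd1 : ((stats.setdefault cur (pvMk3 0 0 0)).insert cur
                (((stats.setdefault cur (pvMk3 0 0 0)).getD cur (pvMk3 0 0 0)).modify "deletions" 0 (· + 1))).keys.Nodup :=
              PySem.Dict.nodup_keys_insert _ _ _ (pv_nodup_setdefault stats cur (pvMk3 0 0 0) hnd)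
            have hOK1 : pvInnerOK ((stats.setdefault cur (pvMk3 0 0 0)).insert cur
                (((stats.setdefault cur (pvMk3 0 0 0)).getD cur (pvMk3 0 0 0)).modify "deletions" 0 (· + 1))) := by
              rw [hmk, pvMk3_modB]
              exact pvInnerOK_insert _ cur x (y+1) z (pvInnerOK_setdefault stats cur hOK)
            rw [ih _ _ true hnd1 hOK1 (PySem.Dict.contains_insert_self _ _ _)]
            show _ = pvMergeAll (pvMergeStep stats (cur, hf, (pvSplitSegs (l :: ls)).1)) (pvSplitSegs (l :: ls)).2
            simp only [pvSplitSegs]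
            rw [if_neg hhdr]
            rw [pvMergeStep_line_minus stats cur hf l (pvSplitSegs ls).1 hnd hOK hc hpl' hmn]
          · have hmn' : (PySem.Str.startswith l "-" && !PySem.Str.startswith l "---") = false := by
              cases h : (PySem.Str.startswith l "-" && !PySem.Str.startswith l "---")
              · rfl
              · exact absurd h hmn
            have hstep : collect_file_stats_step (stats, cur) l = (stats, cur) := by
              simp only [collect_file_stats_step]
              rw [if_neg hhdr, if_neg hat, if_neg hpl, if_neg hmn]
            rw [hstep]
            rw [ih stats cur hf hnd hOK hc]
            show _ = pvMergeAll (pvMergeStep stats (cur, hf, (pvSplitSegs (l :: ls)).1)) (pvSplitSegs (l :: ls)).2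
            simp only [pvSplitSegs]
            rw [if_neg hhdr]
            rw [pvMergeStep_skip stats cur hf l (pvSplitSegs ls).1 hat' hpl' hmn']

-- phase-1 foldl produces exactly pvSplitSegs's segments
theorem pv_seg_bridge : ∀ (lines : List String) (segs : List (String × Bool × List String))
    (key : String) (hf : Bool) (buf : List String),
    (lines.foldl pvSegStep (segs, key, hf, buf)).1
        ++ [((lines.foldl pvSegStep (segs, key, hf, buf)).2.1,
             (lines.foldl pvSegStep (segs, key, hf, buf)).2.2.1,
             (lines.foldl pvSegStep (segs, key, hf, buf)).2.2.2)]
      = segs ++ (key, hf, buf ++ (pvSplitSegs lines).1)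
          :: (pvSplitSegs lines).2.map (fun s => (s.1, true, s.2)) := by
  intro lines
  induction lines with
  | nil => intro segs key hf buf; simp [pvSplitSegs]
  | cons l ls ih =>
    intro segs key hf buf
    by_cases hhdr : PySem.Str.startswith l "diff --git " = true
    · have hstep : pvSegStep (segs, key, hf, buf) l
          = (segs ++ [(key, hf, buf)], extract_path_from_diff_header_py l, true, []) := by
        simp only [pvSegStep]
        rw [if_pos hhdr]
      rw [List.foldl_cons, hstep, ih]
      show _ = segs ++ (key, hf, buf ++ (pvSplitSegs (l :: ls)).1)
          :: (pvSplitSegs (l :: ls)).2.map (fun s => (s.1, true, s.2))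
      simp only [pvSplitSegs]
      rw [if_pos hhdr]
      simp
    · have hstep : pvSegStep (segs, key, hf, buf) l = (segs, key, hf, buf ++ [l]) := by
        simp only [pvSegStep]
        rw [if_neg hhdr]
      rw [List.foldl_cons, hstep, ih]
      show _ = segs ++ (key, hf, buf ++ (pvSplitSegs (l :: ls)).1)
          :: (pvSplitSegs (l :: ls)).2.map (fun s => (s.1, true, s.2))
      simp only [pvSplitSegs]
      rw [if_neg hhdr]
      simp

-- ===== VERDICT (by name: the statement is the Claim_ definition above) =====
theorem collect_file_stats_py_spec : Claim_equal_collect_file_stats_py := by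
  intro t _
  unfold Spec_collect_file_stats_py
  simp only [collect_file_stats_py, collect_file_stats_py_alt]
  have hA := pv_loop_eq (PySem.Str.splitlines t) PySem.Dict.empty "unknown" false
      PySem.Dict.nodup_keys_empty pvInnerOK_empty (by simp)
  have hB := pv_seg_bridge (PySem.Str.splitlines t) [] "unknown" false []
  rw [hA, hB]
  simp only [List.nil_append]
  rw [List.foldl_cons, List.foldl_map]
  rfl
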